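-- pv_equiv track=rewrite | github.com/sasen-git/vhh-designer | active/utilities/align_vs_lead_clear3_antpack_legend_v8.py | split_mapped_for_wrap
-- ===== SOURCE A (Python) =====
-- def _split_range_across_wrap(a, b, W):
--     if not W or W <= 0:
--         return [(a, b)]
--     out = []
--     i = a
--     while i <= b:
--         k = (i - 1) // W
--         row_end = (k + 1) * W
--         j = min(b, row_end)
--         a_loc = i - k * W
--         b_loc = j - k * W
--         out.append((a_loc, b_loc))
--         i = j + 1
--     return out
--
-- def split_mapped_for_wrap(mapped, wrap_len):
--     try:
--         W = int(wrap_len)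
--     except Exception:
--         W = None
--     if not W or W <= 0:
--         return mapped
--
--     out = {}
--     for name, (a, b) in mapped.items():
--         segs = _split_range_across_wrap(a, b, W)
--         if len(segs) == 1:
--             out[name] = segs[0]
--         else:
--             for idx, (aa, bb) in enumerate(segs, 1):
--                 out[f"{name}_part{idx}"] = (aa, bb)
--     return out
-- ===== SOURCE B (Python) =====
-- def split_mapped_for_wrap(mapped, wrap_len):
--     try:
--         W = int(wrap_len)
--     except Exception:
--         W = None
--     if not W or W <= 0:
--         return mapped
--     out = {}
--     for name, (a, b) in mapped.items():
--         if a > b: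
--             continue
--         # local endpoints of the first and last touched rows, by modular arithmetic
--         lo = (a - 1) % W + 1
--         hi = (b - 1) % W + 1
--         n = (b - 1) // W - (a - 1) // W + 1   # number of rows touched
--         if n == 1:
--             out[name] = (lo, hi)
--         else:
--             segs = [(lo, W)] + [(1, W)] * (n - 2) + [(1, hi)]
--             for idx, seg in enumerate(segs, 1):
--                 out[f"{name}_part{idx}"] = seg
--     return out
-- ===== Notes on version B (the rewrite author's own statement) =====
-- stated objective: alternative
-- what changed: Instead of walking the interval chunk-by-chunk computing each segment's endpoints from a row index, B builds the segment list by closed-form construction: modular arithmetic gives the first and last rows' local endpoints (lo=(a-1)%W+1, hi=(b-1)%W+1) and the list is [(lo,W)] + [(1,W)]*(n-2) + [(1,hi)] with n the row count, so no per-segment loop or per-row arithmetic exists at all.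
import Mathlib
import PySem

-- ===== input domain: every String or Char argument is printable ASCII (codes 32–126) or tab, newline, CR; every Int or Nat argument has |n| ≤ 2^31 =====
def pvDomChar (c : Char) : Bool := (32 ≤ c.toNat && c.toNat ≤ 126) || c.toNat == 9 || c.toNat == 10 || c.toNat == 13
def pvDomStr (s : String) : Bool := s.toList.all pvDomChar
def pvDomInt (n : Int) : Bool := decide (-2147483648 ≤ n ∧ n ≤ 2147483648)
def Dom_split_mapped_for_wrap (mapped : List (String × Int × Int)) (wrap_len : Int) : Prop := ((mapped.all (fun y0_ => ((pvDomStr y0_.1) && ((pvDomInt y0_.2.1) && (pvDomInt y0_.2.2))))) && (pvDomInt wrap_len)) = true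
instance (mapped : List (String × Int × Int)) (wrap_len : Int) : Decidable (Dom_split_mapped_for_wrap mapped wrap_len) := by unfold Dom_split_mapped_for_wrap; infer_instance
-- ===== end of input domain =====

-- B drops the chunk-walking helper entirely: it builds each entry's segment list in
-- closed form — modular arithmetic for the two end rows and list repetition
-- [(1,W)]*(n-2) for the full middle rows; objective: alternative decomposition.
-- Both sides receive the Python dict as an association list and normalise it with
-- PySem.Dict.ofList (duplicate keys collapse exactly as Python's dict does).

-- ===== PORT A =====
-- while-loop of _split_range_across_wrap; the hypothesis 0 < W only serves termination
def pvSplitLoop (b W : Int) (hW : 0 < W) (i : Int) : List (Int × Int) :=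
  if h : i ≤ b then
    let k := PySem.Int.floordiv (i - 1) W
    let j := min b ((k + 1) * W)
    (i - k * W, j - k * W) :: pvSplitLoop b W hW (j + 1)
  else []
termination_by (b + 1 - i).toNat
decreasing_by
  have hk := (PySem.Int.floordiv_eq_iff_of_pos (a := i - 1) (b := W) hW
      (q := PySem.Int.floordiv (i - 1) W)).mp rfl
  simp only at *
  omega

def pvSplitRange (a b W : Int) : List (Int × Int) :=
  if h : W = 0 ∨ W ≤ 0 then [(a, b)]
  else pvSplitLoop b W (by omega) a

def split_mapped_for_wrap (mapped : List (String × Int × Int)) (wrap_len : Int) : List (String × Int × Int) :=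
  let W := wrap_len
  if W = 0 ∨ W ≤ 0 then (PySem.Dict.ofList mapped).items
  else
    ((PySem.Dict.ofList mapped).items.foldl
      (fun (d : PySem.Dict String (Int × Int)) nt =>
        let name := nt.1
        let a := nt.2.1
        let b := nt.2.2
        let segs := pvSplitRange a b W
        if segs.length = 1 then d.insert name (segs.headD (0, 0))
        else (segs.foldl
               (fun (p : PySem.Dict String (Int × Int) × Int) seg =>
                 (p.1.insert (name ++ "_part" ++ PySem.Int.toStr p.2) seg, p.2 + 1))
               (d, 1)).1)
      PySem.Dict.empty).items

-- ===== PORT B =====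
def split_mapped_for_wrap_alt (mapped : List (String × Int × Int)) (wrap_len : Int) : List (String × Int × Int) :=
  let W := wrap_len
  if W = 0 ∨ W ≤ 0 then (PySem.Dict.ofList mapped).items
  else
    ((PySem.Dict.ofList mapped).items.foldl
      (fun (d : PySem.Dict String (Int × Int)) nt =>
        let name := nt.1
        let a := nt.2.1
        let b := nt.2.2
        if b < a then d
        else
          let lo := PySem.Int.mod (a - 1) W + 1
          let hi := PySem.Int.mod (b - 1) W + 1
          let n := PySem.Int.floordiv (b - 1) W - PySem.Int.floordiv (a - 1) W + 1
          if n = 1 then d.insert name (lo, hi)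
          else
            let segs := [(lo, W)] ++ PySem.List.pyRepeat [((1 : Int), W)] (n - 2) ++ [(1, hi)]
            (segs.foldl
              (fun (p : PySem.Dict String (Int × Int) × Int) seg =>
                (p.1.insert (name ++ "_part" ++ PySem.Int.toStr p.2) seg, p.2 + 1))
              (d, 1)).1)
      PySem.Dict.empty).items

-- ===== PRECONDITION & SPEC =====
def Spec_split_mapped_for_wrap (mapped : List (String × Int × Int)) (wrap_len : Int) (out : List (String × Int × Int)) : Prop := out = split_mapped_for_wrap_alt mapped wrap_len
instance (mapped : List (String × Int × Int)) (wrap_len : Int) (out : List (String × Int × Int)) : Decidable (Spec_split_mapped_for_wrap mapped wrap_len out) := by unfold Spec_split_mapped_for_wrap; infer_instance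

-- ===== CLAIM (what is proved, stated in full; the proofs are below) =====
def Claim_equal_split_mapped_for_wrap : Prop := ∀ (mapped : List (String × Int × Int)) (wrap_len : Int), Dom_split_mapped_for_wrap mapped wrap_len → Spec_split_mapped_for_wrap mapped wrap_len (split_mapped_for_wrap mapped wrap_len)

-- ===== LEMMAS AND PROOFS =====

-- A's while loop, characterised as a map over the row numbers fd(i-1)..fd(b-1)
theorem pvSplitLoop_eq (b W : Int) (hW : 0 < W) :
    ∀ (n : Nat) (i : Int), i ≤ b → (b + 1 - i).toNat ≤ n →
      pvSplitLoop b W hW i =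
        (PySem.List.pyRange (PySem.Int.floordiv (i - 1) W) (PySem.Int.floordiv (b - 1) W + 1) 1).map
          (fun k => (max i (k * W + 1) - k * W, min b ((k + 1) * W) - k * W)) := by
  intro n
  induction n with
  | zero => intro i hib hn; omega
  | succ n ih =>
    intro i hib hn
    set k := PySem.Int.floordiv (i - 1) W with hkdef
    set kb := PySem.Int.floordiv (b - 1) W with hkbdef
    have hk : k * W ≤ i - 1 ∧ i - 1 < (k + 1) * W :=
      (PySem.Int.floordiv_eq_iff_of_pos hW).mp hkdef.symm
    have hkb : kb * W ≤ b - 1 ∧ b - 1 < (kb + 1) * W :=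
      (PySem.Int.floordiv_eq_iff_of_pos hW).mp hkbdef.symm
    have hkkb : k ≤ kb := by
      rw [hkbdef, PySem.Int.le_floordiv_iff_mul_le hW]
      omega
    rw [pvSplitLoop]
    simp only [hib, dif_pos]
    rw [← hkdef]
    by_cases hkeq : k = kb
    · -- last row: j = b, loop stops
      rw [hkeq] at hk
      rw [hkeq]
      have hmin : min b ((kb + 1) * W) = b := by omega
      rw [hmin, pvSplitLoop]
      simp only [show ¬ (b + 1 ≤ b) by omega, dif_neg, not_false_iff]
      rw [PySem.List.pyRange_one_singleton]
      simp only [List.map_cons, List.map_nil]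
      have hmax : max i (kb * W + 1) = i := by omega
      have hmin2 : min b ((kb + 1) * W) = b := by omega
      rw [hmax, hmin2]
    · -- middle row: j = (k+1)*W, recurse on the next row
      have hklt : k < kb := lt_of_le_of_ne hkkb hkeq
      have hrow : (k + 1) * W ≤ b - 1 := by
        have : (k + 1) * W ≤ kb * W := by
          apply mul_le_mul_of_nonneg_right _ (le_of_lt hW); omega
        omega
      have hmin : min b ((k + 1) * W) = (k + 1) * W := by omega
      rw [hmin]
      have hnext : PySem.Int.floordiv ((k + 1) * W + 1 - 1) W = k + 1 := by
        rw [PySem.Int.floordiv_eq_iff_of_pos hW]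
        constructor
        · omega
        · nlinarith
      have hrec := ih ((k + 1) * W + 1) (by omega) (by omega)
      rw [hrec, hnext]
      rw [PySem.List.pyRange_one_cons (by omega : k < kb + 1)]
      simp only [List.map_cons]
      congr 1
      · have hmax : max i (k * W + 1) = i := by omega
        rw [hmax, hmin]
      · apply List.map_congr_left
        intro x hx
        have hxm := (PySem.List.mem_pyRange_one).mp hx
        have hxg : (k + 1) * W ≤ x * W := by
          apply mul_le_mul_of_nonneg_right _ (le_of_lt hW); omega
        have h1 : max ((k + 1) * W + 1) (x * W + 1) = x * W + 1 := by omega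
        have h2 : max i (x * W + 1) = x * W + 1 := by omega
        rw [h1, h2]

-- the two per-entry update functions coincide when 0 < W
theorem pvStep_eq (W : Int) (hW0 : ¬ (W = 0 ∨ W ≤ 0))
    (d : PySem.Dict String (Int × Int)) (nt : String × Int × Int) :
    (if (pvSplitRange nt.2.1 nt.2.2 W).length = 1 then
       d.insert nt.1 ((pvSplitRange nt.2.1 nt.2.2 W).headD (0, 0))
     else ((pvSplitRange nt.2.1 nt.2.2 W).foldl
            (fun (p : PySem.Dict String (Int × Int) × Int) seg =>
              (p.1.insert (nt.1 ++ "_part" ++ PySem.Int.toStr p.2) seg, p.2 + 1))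
            (d, 1)).1)
    = (if nt.2.2 < nt.2.1 then d
       else
         if PySem.Int.floordiv (nt.2.2 - 1) W - PySem.Int.floordiv (nt.2.1 - 1) W + 1 = 1 then
           d.insert nt.1 (PySem.Int.mod (nt.2.1 - 1) W + 1, PySem.Int.mod (nt.2.2 - 1) W + 1)
         else (([(PySem.Int.mod (nt.2.1 - 1) W + 1, W)] ++
                 PySem.List.pyRepeat [((1 : Int), W)]
                   (PySem.Int.floordiv (nt.2.2 - 1) W - PySem.Int.floordiv (nt.2.1 - 1) W + 1 - 2) ++
                 [(1, PySem.Int.mod (nt.2.2 - 1) W + 1)]).foldl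
                (fun (p : PySem.Dict String (Int × Int) × Int) seg =>
                  (p.1.insert (nt.1 ++ "_part" ++ PySem.Int.toStr p.2) seg, p.2 + 1))
                (d, 1)).1) := by
  obtain ⟨name, a, b⟩ := nt
  have hW : 0 < W := by omega
  simp only
  by_cases hab : b < a
  · -- empty range: A's loop never runs
    have hsegs : pvSplitRange a b W = [] := by
      rw [pvSplitRange]
      simp only [hW0, dif_neg, not_false_iff]
      rw [pvSplitLoop]
      simp only [show ¬ (a ≤ b) by omega, dif_neg, not_false_iff]
    rw [hsegs]
    simp [hab]
  · rw [not_lt] at hab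
    set ka := PySem.Int.floordiv (a - 1) W with hkadef
    set kb := PySem.Int.floordiv (b - 1) W with hkbdef
    have hka : ka * W ≤ a - 1 ∧ a - 1 < (ka + 1) * W :=
      (PySem.Int.floordiv_eq_iff_of_pos hW).mp hkadef.symm
    have hkb : kb * W ≤ b - 1 ∧ b - 1 < (kb + 1) * W :=
      (PySem.Int.floordiv_eq_iff_of_pos hW).mp hkbdef.symm
    have hkakb : ka ≤ kb := by
      rw [hkbdef, PySem.Int.le_floordiv_iff_mul_le hW]
      omega
    have hmoda : PySem.Int.mod (a - 1) W = a - 1 - ka * W := by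
      have := PySem.Int.floordiv_mul_add_mod (a - 1) W
      rw [← hkadef] at this
      omega
    have hmodb : PySem.Int.mod (b - 1) W = b - 1 - kb * W := by
      have := PySem.Int.floordiv_mul_add_mod (b - 1) W
      rw [← hkbdef] at this
      omega
    have hsegs : pvSplitRange a b W =
        (PySem.List.pyRange ka (kb + 1) 1).map
          (fun k => (max a (k * W + 1) - k * W, min b ((k + 1) * W) - k * W)) := by
      rw [pvSplitRange]
      simp only [hW0, dif_neg, not_false_iff]
      exact pvSplitLoop_eq b W hW (b + 1 - a).toNat a hab (le_refl _)
    rw [hsegs, if_neg (by omega : ¬ b < a)]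
    simp only [List.length_map, PySem.List.length_pyRange_one]
    by_cases hkeq : ka = kb
    · -- one row: plain name
      rw [if_pos (by omega : (kb + 1 - ka).toNat = 1), if_pos (by omega : kb - ka + 1 = 1)]
      rw [← hkeq] at hkb
      rw [← hkeq, PySem.List.pyRange_one_singleton]
      simp only [List.map_cons, List.map_nil, List.headD_cons]
      have hmax : max a (ka * W + 1) = a := by omega
      have hmin : min b ((ka + 1) * W) = b := by omega
      rw [hmax, hmin, hmoda, hmodb, ← hkeq]
      congr 2 <;> omega
    · -- several rows: name_part{idx}; the two segment LISTS are equal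
      have hlt : ka < kb := lt_of_le_of_ne hkakb hkeq
      rw [if_neg (by omega : ¬ (kb + 1 - ka).toNat = 1), if_neg (by omega : ¬ kb - ka + 1 = 1)]
      congr 1
      -- map over the row range = [first] ++ middle repetition ++ [last]
      rw [PySem.List.pyRange_one_succ_right hkakb,
          PySem.List.pyRange_one_cons (by omega : ka < kb)]
      simp only [List.map_append, List.map_cons, List.map_nil]
      have hfirst : max a (ka * W + 1) - ka * W = PySem.Int.mod (a - 1) W + 1 := by
        have : max a (ka * W + 1) = a := by omega
        rw [this, hmoda]; omega
      have hfw : min b ((ka + 1) * W) - ka * W = W := by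
        have h1 : (ka + 1) * W ≤ kb * W := by
          apply mul_le_mul_of_nonneg_right _ (le_of_lt hW); omega
        have : min b ((ka + 1) * W) = (ka + 1) * W := by omega
        rw [this]; ring
      have hlastx : max a (kb * W + 1) - kb * W = 1 := by
        have h1 : (ka + 1) * W ≤ kb * W := by
          apply mul_le_mul_of_nonneg_right _ (le_of_lt hW); omega
        have : max a (kb * W + 1) = kb * W + 1 := by omega
        rw [this]; ring
      have hlasty : min b ((kb + 1) * W) - kb * W = PySem.Int.mod (b - 1) W + 1 := by
        have : min b ((kb + 1) * W) = b := by omega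
        rw [this, hmodb]; omega
      have hmid : (PySem.List.pyRange (ka + 1) kb 1).map
          (fun k => (max a (k * W + 1) - k * W, min b ((k + 1) * W) - k * W))
          = PySem.List.pyRepeat [((1 : Int), W)] (kb - ka + 1 - 2) := by
        rw [PySem.List.pyRepeat_singleton, List.eq_replicate_iff]
        constructor
        · simp only [List.length_map, PySem.List.length_pyRange_one]
          omega
        · intro p hp
          obtain ⟨k, hk, hpk⟩ := List.mem_map.mp hp
          have hkm := PySem.List.mem_pyRange_one.mp hk
          have h1 : (ka + 1) * W ≤ k * W := by
            apply mul_le_mul_of_nonneg_right _ (le_of_lt hW); omega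
          have h2 : (k + 1) * W ≤ kb * W := by
            apply mul_le_mul_of_nonneg_right _ (le_of_lt hW); omega
          have hx : max a (k * W + 1) = k * W + 1 := by omega
          have hy : min b ((k + 1) * W) = (k + 1) * W := by omega
          rw [← hpk, hx, hy]
          simp only [Prod.mk.injEq]
          constructor <;> ring
      rw [hfirst, hfw, hlastx, hlasty, hmid]
      simp only [List.singleton_append]

-- ===== VERDICT (by name: the statement is the Claim_ definition above) =====
theorem split_mapped_for_wrap_spec : Claim_equal_split_mapped_for_wrap := by
  intro mapped wrap_len _
  unfold Spec_split_mapped_for_wrap split_mapped_for_wrap split_mapped_for_wrap_alt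
  by_cases hW : wrap_len = 0 ∨ wrap_len ≤ 0
  · simp only [hW, if_pos]
  · simp only [hW, if_neg, not_false_iff]
    congr 1
    apply PySem.List.foldl_congr_mem
    intro d nt _
    exact pvStep_eq wrap_len hW d nt
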